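-- pv_equiv track=rewrite | github.com/serapred/academy | 0712/syllabification.py | syllabify
-- ===== SOURCE A (Python) =====
-- VOWELS = set('aAeiou')
--
-- def syllabify(text):
--
--     ans = text[-1]
--     # reverse indexed iteration
--     for i in reversed(range(len(text) - 1)):
--         ans += text[i]
--         try:
--             if text[i] not in VOWELS and \
--                     text[i + 1] in VOWELS:
--                 ans += '.'
--         except IndexError:
--             pass
--     return ans[::-1][1:]
-- ===== SOURCE B (Python) =====
-- VOWELS = set('aAeiou')
--
-- def syllabify(text):
--     # Compute the cut positions (a dot goes right before each consonant that
--     # precedes a vowel), slice the text at those cuts and join with '.',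
--     # then drop the leading character.
--     n = len(text)
--     cuts = [i - 1 for i in range(1, n)
--             if text[i] in VOWELS and text[i - 1] not in VOWELS]
--     parts = [text[a:b] for a, b in zip([0] + cuts, cuts + [n])]
--     return '.'.join(parts)[1:]
-- ===== Notes on version B (the rewrite author's own statement) =====
-- stated objective: alternative
-- what changed: A builds the answer character-by-character in a reversed index loop (appending each char and a dot after it, then reversing and slicing); B instead computes the list of cut positions with one filter, slices the text at those cuts and joins the slices with a dot separator, dropping the leading character. Pre_ excludes only the empty string, on which A raises IndexError while B returns an empty result.
import Mathlib
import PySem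

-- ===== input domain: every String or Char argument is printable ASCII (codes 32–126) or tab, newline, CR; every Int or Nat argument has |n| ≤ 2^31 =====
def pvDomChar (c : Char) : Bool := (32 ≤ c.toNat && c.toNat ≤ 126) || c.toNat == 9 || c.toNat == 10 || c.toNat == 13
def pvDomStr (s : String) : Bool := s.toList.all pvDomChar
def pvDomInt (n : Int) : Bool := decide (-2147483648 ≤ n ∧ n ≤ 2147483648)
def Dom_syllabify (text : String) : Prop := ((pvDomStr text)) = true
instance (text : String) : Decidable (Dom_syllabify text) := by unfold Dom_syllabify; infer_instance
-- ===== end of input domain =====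

-- B replaces A's reversed char-by-char accumulation (then reverse-and-slice) by computing
-- the dot positions once, slicing the text there and joining with '.' (alternative decomposition).

-- VOWELS = set('aAeiou')
def pvVowels : PySem.Set Char := PySem.Set.ofList "aAeiou".toList

-- ===== PORT A =====
def syllabify (text : String) : String :=
  let cs := text.toList
  -- ans = text[-1]  (IndexError on empty text: excluded by Pre_)
  let ans0 : List Char := (PySem.List.pyGet? cs (-1)).elim [] (fun c => [c])
  -- for i in reversed(range(len(text) - 1)): …
  let ans := ((PySem.List.pyRange 0 ((cs.length : Int) - 1) 1).reverse).foldl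
    (fun ans i =>
      let ci := PySem.List.pyGetD cs i ' '      -- text[i]; always in range: 0 ≤ i < len-1
      let ans := ans ++ [ci]                    -- ans += text[i]
      -- try: … text[i+1] … / except IndexError: pass  (none = IndexError: keep ans)
      (PySem.List.pyGet? cs (i + 1)).elim ans (fun cj =>
          if ¬ pvVowels.contains ci ∧ pvVowels.contains cj then ans ++ ['.'] else ans))
    ans0
  -- return ans[::-1][1:]
  String.ofList (PySem.List.slice ((PySem.List.slice? ans none none (-1)).getD []) (some 1) none)

-- ===== PORT B =====
def syllabify_alt (text : String) : String :=
  let cs := text.toList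
  let n : Int := cs.length
  -- cuts = [i - 1 for i in range(1, n) if text[i] in VOWELS and text[i-1] not in VOWELS]
  let cuts := ((PySem.List.pyRange 1 n 1).filter (fun i =>
      pvVowels.contains (PySem.List.pyGetD cs i ' ') &&
      !(pvVowels.contains (PySem.List.pyGetD cs (i - 1) ' ')))).map (· - 1)
  -- parts = [text[a:b] for a, b in zip([0] + cuts, cuts + [n])]
  let parts := (List.zip (0 :: cuts) (cuts ++ [n])).map
      (fun ab => PySem.List.slice cs (some ab.1) (some ab.2))
  -- return '.'.join(parts)[1:]
  String.ofList (PySem.List.slice (List.intercalate ['.'] parts) (some 1) none)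

-- ===== PRECONDITION & SPEC =====
-- Pre_ excludes only the empty string, on which A raises IndexError (text[-1]).
def Pre_syllabify (text : String) : Prop := text ≠ ""
instance (text : String) : Decidable (Pre_syllabify text) := by unfold Pre_syllabify; infer_instance
def pvWitness_syllabify : String := "banana"

def Spec_syllabify (text : String) (out : String) : Prop := out = syllabify_alt text
instance (text : String) (out : String) : Decidable (Spec_syllabify text out) := by unfold Spec_syllabify; infer_instance

-- ===== CLAIM (what is proved, stated in full; the proofs are below) =====
def Claim_equal_syllabify : Prop := ∀ (text : String), Dom_syllabify text → Pre_syllabify text → Spec_syllabify text (syllabify text)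


-- ===== LEMMAS AND PROOFS =====

-- proof-only abbreviations for the two programs' building blocks
def pvCD (cs : List Char) (i : Int) : Char := PySem.List.pyGetD cs i ' '

def pvCond (cs : List Char) (i : Int) : Bool :=
  pvVowels.contains (PySem.List.pyGetD cs i ' ') &&
  !(pvVowels.contains (PySem.List.pyGetD cs (i - 1) ' '))

def pvPiece (cs : List Char) (i : Int) : List Char :=
  if i + 1 < (cs.length : Int) ∧ pvCond cs (i + 1) = true
  then ['.', pvCD cs i] else [pvCD cs i]

def pvK (cs : List Char) (lo : Int) : List Int :=
  ((PySem.List.pyRange (lo + 1) (cs.length : Int) 1).filter (pvCond cs)).map (· - 1)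

def pvParts (cs : List Char) (lo : Int) : List Char :=
  List.intercalate ['.'] ((List.zip (lo :: pvK cs lo) (pvK cs lo ++ [(cs.length : Int)])).map
    (fun ab => PySem.List.slice cs (some ab.1) (some ab.2)))

def pvGG (cs : List Char) (i : Int) : List Char :=
  [pvCD cs i] ++ (if pvCond cs (i + 1) = true then ['.'] else [])

lemma pv_ic_cons (sep l r : List Char) (rs : List (List Char)) :
    List.intercalate sep (l :: r :: rs) = l ++ sep ++ List.intercalate sep (r :: rs) := by
  simp [List.intercalate, List.intersperse]

lemma pv_ic_head (sep : List Char) (c : Char) (l : List Char) (rest : List (List Char)) :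
    List.intercalate sep ((c :: l) :: rest) = c :: List.intercalate sep (l :: rest) := by
  cases rest <;> simp [List.intercalate, List.intersperse]

lemma pv_mem_K {cs : List Char} {lo k : Int} (h : k ∈ pvK cs lo) :
    lo ≤ k ∧ k + 1 < (cs.length : Int) := by
  simp only [pvK, List.mem_map, List.mem_filter] at h
  obtain ⟨i, ⟨hi, -⟩, rfl⟩ := h
  rw [PySem.List.mem_pyRange_one] at hi
  omega

lemma pv_slice_cons (cs : List Char) {lo b : Int} (h0 : 0 ≤ lo) (h1 : lo < b)
    (h2 : lo < (cs.length : Int)) :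
    PySem.List.slice cs (some lo) (some b) =
      pvCD cs lo :: PySem.List.slice cs (some (lo + 1)) (some b) := by
  rw [PySem.List.slice_toNat cs h0 (by omega), PySem.List.slice_toNat cs (by omega) (by omega)]
  rw [List.drop_eq_getElem_cons (by omega)]
  have hb : b.toNat - lo.toNat = (b.toNat - (lo + 1).toNat) + 1 := by omega
  have hl : (lo + 1).toNat = lo.toNat + 1 := by omega
  rw [hb, List.take_succ_cons, pvCD, PySem.List.pyGetD_eq_getElem cs ' ' h0 h2, hl]

lemma pv_K_step (cs : List Char) (lo : Int) :
    pvK cs lo = if lo + 1 < (cs.length : Int) ∧ pvCond cs (lo + 1) = true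
                then lo :: pvK cs (lo + 1) else pvK cs (lo + 1) := by
  by_cases hlt : lo + 1 < (cs.length : Int)
  · rw [pvK, PySem.List.pyRange_one_cons hlt, List.filter_cons]
    by_cases hc : pvCond cs (lo + 1) = true <;> simp [hc, hlt, pvK]
  · rw [pvK, PySem.List.pyRange_one_eq_nil (by omega), pvK,
      PySem.List.pyRange_one_eq_nil (by omega)]
    simp [hlt]

lemma pv_peel (cs : List Char) {lo : Int} (h0 : 0 ≤ lo) (h1 : lo < (cs.length : Int)) :
    List.intercalate ['.'] ((List.zip (lo :: pvK cs (lo + 1)) (pvK cs (lo + 1) ++ [(cs.length : Int)])).map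
      (fun ab => PySem.List.slice cs (some ab.1) (some ab.2))) =
    pvCD cs lo :: pvParts cs (lo + 1) := by
  cases hK : pvK cs (lo + 1) with
  | nil =>
      simp only [pvParts, hK, List.nil_append, List.zip_cons_cons, List.zip_nil_left,
        List.map_cons, List.map_nil, List.intercalate]
      simp [pv_slice_cons cs h0 h1 h1]
  | cons k ks =>
      have hk : lo + 1 ≤ k := (pv_mem_K (by rw [hK]; exact List.mem_cons_self)).1
      simp only [pvParts, hK, List.cons_append, List.zip_cons_cons, List.map_cons]
      rw [pv_slice_cons cs h0 (by omega) h1, pv_ic_head]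

lemma pv_main (cs : List Char) : ∀ (m : Nat) (lo : Int), 0 ≤ lo →
    lo + m = (cs.length : Int) →
    pvParts cs lo = (PySem.List.pyRange lo (cs.length : Int) 1).flatMap (pvPiece cs) := by
  intro m
  induction m with
  | zero =>
      intro lo h0 hm
      have hlo : lo = (cs.length : Int) := by omega
      subst hlo
      rw [pvParts, pvK, PySem.List.pyRange_one_eq_nil (by omega),
        PySem.List.pyRange_one_eq_nil le_rfl]
      simp [List.intercalate, PySem.List.slice_toNat cs h0 h0]
  | succ m ih =>
      intro lo h0 hm
      have hlt : lo < (cs.length : Int) := by omega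
      rw [PySem.List.pyRange_one_cons hlt, List.flatMap_cons,
        ← ih (lo + 1) (by omega) (by omega)]
      rw [pvParts, pv_K_step cs lo]
      by_cases hc : lo + 1 < (cs.length : Int) ∧ pvCond cs (lo + 1) = true
      · rw [if_pos hc]
        have hsl : PySem.List.slice cs (some lo) (some lo) = [] := by
          simp [PySem.List.slice_toNat cs h0 h0]
        cases hK : pvK cs (lo + 1) with
        | nil =>
            simp only [List.cons_append, List.zip_cons_cons, List.map_cons,
              List.nil_append, List.zip_nil_left, List.map_nil, hsl]
            rw [pv_ic_cons]
            have := pv_peel cs h0 hlt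
            rw [hK] at this
            simp only [List.nil_append, List.zip_cons_cons, List.zip_nil_left,
              List.map_cons, List.map_nil] at this
            rw [this, pvPiece, if_pos hc]
            simp
        | cons k ks =>
            simp only [List.cons_append, List.zip_cons_cons, List.map_cons, hsl]
            rw [pv_ic_cons]
            have := pv_peel cs h0 hlt
            rw [hK] at this
            simp only [List.cons_append, List.zip_cons_cons, List.map_cons] at this
            rw [this, pvPiece, if_pos hc]
            simp
      · rw [if_neg hc]
        rw [pv_peel cs h0 hlt, pvPiece, if_neg hc]
        simp

lemma pv_gg_rev {cs : List Char} {i : Int} (h1 : i + 1 < (cs.length : Int)) :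
    (pvGG cs i).reverse = pvPiece cs i := by
  by_cases h : pvCond cs (i + 1) = true <;> simp [pvGG, pvPiece, h, h1]

lemma pv_B (text : String) :
    syllabify_alt text = String.ofList ((pvParts text.toList 0).drop 1) := by
  have hfun : (fun i => pvVowels.contains (PySem.List.pyGetD text.toList i ' ') &&
      !(pvVowels.contains (PySem.List.pyGetD text.toList (i - 1) ' '))) = pvCond text.toList := by
    funext i; rfl
  rw [syllabify_alt, pvParts, pvK]
  rw [PySem.List.slice_from _ (by omega)]
  simp only [hfun, zero_add, Int.toNat_one]

lemma pv_A (text : String) (h : text.toList ≠ []) :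
    syllabify text =
      String.ofList (((PySem.List.pyRange 0 (text.toList.length : Int) 1).flatMap
        (pvPiece text.toList)).drop 1) := by
  rw [syllabify]
  set cs := text.toList with hcs
  have hn : 1 ≤ (cs.length : Int) := by
    have := List.length_pos_iff.mpr h
    omega
  -- ans0 = [last element]
  rw [PySem.List.pyGet?_neg_one, List.getLast?_eq_some_getLast h]
  -- the loop body appends gg i
  rw [PySem.List.foldl_congr_mem _ _ (fun acc i => acc ++ pvGG cs i) _ ?hbody]
  case hbody =>
    intro acc i hi
    rw [List.mem_reverse, PySem.List.mem_pyRange_one] at hi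
    have h2 : i + 1 < (cs.length : Int) := by omega
    simp only [PySem.List.pyGet?_eq_some_getElem cs (i := i + 1) (by omega) h2,
      Option.elim_some]
    have hj : (i + 1).toNat < cs.length := by omega
    have hcd : PySem.List.pyGetD cs (i + 1) ' ' = cs[(i + 1).toNat]'hj :=
      PySem.List.pyGetD_eq_getElem cs ' ' (by omega) h2
    have hcond : pvCond cs (i + 1) =
        (pvVowels.contains (cs[(i + 1).toNat]'hj) && !(pvVowels.contains (PySem.List.pyGetD cs i ' '))) := by
      have h3 : i + 1 - 1 = i := by omega
      rw [pvCond, hcd, h3]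
    by_cases hp : ¬ pvVowels.contains (PySem.List.pyGetD cs i ' ') = true ∧
        pvVowels.contains (cs[(i + 1).toNat]'hj) = true
    · rw [if_pos hp, pvGG, pvCD]
      have : pvCond cs (i + 1) = true := by
        rw [hcond]
        simp
        exact ⟨by simpa using hp.2, by simpa using hp.1⟩
      rw [if_pos this, List.append_assoc]
    · rw [if_neg hp, pvGG, pvCD]
      have : ¬ pvCond cs (i + 1) = true := by
        rw [hcond]
        intro hcc
        exact hp ⟨by simpa using (Bool.and_eq_true_iff.mp hcc).2,
                  (Bool.and_eq_true_iff.mp hcc).1⟩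
      rw [if_neg this]
      simp
  rw [PySem.List.foldl_append_eq_flatMap]
  rw [PySem.List.slice?_none_none_neg_one]
  simp only [Option.getD_some]
  rw [PySem.List.slice_from _ (by omega)]
  rw [List.reverse_append, List.reverse_flatMap, List.reverse_reverse]
  have hfm : List.flatMap (List.reverse ∘ pvGG cs) (PySem.List.pyRange 0 ((cs.length : Int) - 1) 1) =
      List.flatMap (pvPiece cs) (PySem.List.pyRange 0 ((cs.length : Int) - 1) 1) := by
    apply List.flatMap_congr
    intro i hi
    rw [PySem.List.mem_pyRange_one] at hi
    exact pv_gg_rev (by omega)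
  rw [hfm]
  have hsplit : PySem.List.pyRange 0 (cs.length : Int) 1 =
      PySem.List.pyRange 0 ((cs.length : Int) - 1) 1 ++ [(cs.length : Int) - 1] := by
    have h1 : (cs.length : Int) = ((cs.length : Int) - 1) + 1 := by omega
    conv_lhs => rw [h1]
    rw [PySem.List.pyRange_one_succ_right (by omega)]
  rw [hsplit, List.flatMap_append, List.flatMap_singleton]
  have hlastp : pvPiece cs ((cs.length : Int) - 1) = [cs.getLast h] := by
    rw [pvPiece, if_neg (by omega), pvCD,
      PySem.List.pyGetD_eq_getElem cs ' ' (by omega) (by omega),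
      List.getLast_eq_getElem]
    congr 2
    omega
  rw [hlastp]
  simp

-- ===== VERDICT (by name: the statement is the Claim_ definition above) =====
theorem syllabify_spec : Claim_equal_syllabify := by
  intro text hdom hpre
  have h : text.toList ≠ [] := by
    intro he
    exact hpre (String.toList_eq_nil_iff.mp he)
  show syllabify text = syllabify_alt text
  rw [pv_A text h, pv_B text,
    pv_main text.toList text.toList.length 0 le_rfl (by simp)]
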